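-- pv_equiv track=rewrite | github.com/sabill123/ontology | src/unified_pipeline/autonomous/analysis/llm_schema_analyzer.py | _find_pk_column
-- ===== SOURCE A (Python) =====
-- from typing import List, Dict, Any, Optional, Set, Tuple
--
-- def _find_pk_column(table_name: str, columns: List[str]) -> Optional[str]:
--     """테이블의 PK 컬럼 찾기"""
--     table_lower = table_name.lower()
--     table_singular = table_lower.rstrip('s')
--
--     # Common PK patterns
--     pk_patterns = [
--         f"{table_singular}_id",
--         f"{table_lower}_id",
--         "id",
--         f"{table_singular[:4]}_id" if len(table_singular) > 4 else None,
--     ]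
--     pk_patterns = [p for p in pk_patterns if p]
--
--     for pattern in pk_patterns:
--         for col in columns:
--             if col.lower() == pattern:
--                 return col
--
--     # Fallback: first column ending with _id
--     for col in columns:
--         if col.lower().endswith('_id'):
--             return col
--
--     return columns[0] if columns else None
-- ===== SOURCE B (Python) =====
-- from typing import List, Optional
--
--
-- def _find_pk_column(table_name: str, columns: List[str]) -> Optional[str]:
--     table_lower = table_name.lower()
--     table_singular = table_lower.rstrip('s')
--
--     pk_patterns = [f"{table_singular}_id", f"{table_lower}_id", "id"]
--     if len(table_singular) > 4:
--         pk_patterns.append(f"{table_singular[:4]}_id")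
--     n = len(pk_patterns)
--
--     def rank(col: str) -> int:
--         low = col.lower()
--         if low in pk_patterns:
--             return pk_patterns.index(low)
--         return n if low.endswith('_id') else n + 1
--
--     # Single pass: min() keeps the FIRST column of minimal rank.
--     return min(columns, key=rank) if columns else None
-- ===== Notes on version B (the rewrite author's own statement) =====
-- stated objective: simpler
-- what changed: Replaces A's pattern-outer nested scans plus two separate fallback loops by a single pass: each column gets a rank (index of its matching pattern, an '_id'-suffix tier, or a default tier) and B returns min(columns, key=rank), whose first-minimal tie-breaking reproduces A's priority and first-occurrence order.
import Mathlib
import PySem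

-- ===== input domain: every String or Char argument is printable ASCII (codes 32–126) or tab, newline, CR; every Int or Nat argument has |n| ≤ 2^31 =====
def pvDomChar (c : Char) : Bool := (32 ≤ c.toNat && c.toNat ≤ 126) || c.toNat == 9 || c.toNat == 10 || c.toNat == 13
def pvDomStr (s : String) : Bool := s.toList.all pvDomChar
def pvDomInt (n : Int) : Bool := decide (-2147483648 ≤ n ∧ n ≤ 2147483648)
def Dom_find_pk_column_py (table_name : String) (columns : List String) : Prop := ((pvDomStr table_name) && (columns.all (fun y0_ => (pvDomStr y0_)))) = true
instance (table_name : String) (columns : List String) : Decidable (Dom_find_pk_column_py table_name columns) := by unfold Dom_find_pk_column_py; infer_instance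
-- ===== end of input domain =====

-- B replaces A's pattern-outer nested scans and two fallback loops by one ranked pass
-- (min(columns, key=rank)); same return value, objective: simpler.

-- ===== PORT A =====
-- str.rstrip('s') ported by hand (PySem has no chars-argument rstrip): drop trailing 's'
-- characters; exact for every string.
def pyRstripS (s : String) : String :=
  String.ofList ((s.toList.reverse.dropWhile (fun c => c == 's')).reverse)

-- the nested 'for pattern in pk_patterns: for col in columns: … return col'
def loopA (patterns : List String) (columns : List String) : Option String :=
  match patterns with
  | [] => none
  | p :: ps =>
    match columns.find? (fun col => PySem.Str.lower col == p) with
    | some col => some col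
    | none => loopA ps columns

-- the staged tail of A: the two fallback loops after the nested pattern scan
def afterLoop (columns : List String) (r : Option String) : Option String :=
  match r with
  | some col => some col
  | none =>
    match columns.find? (fun col => PySem.Str.endswith (PySem.Str.lower col) "_id") with
    | some col => some col
    | none => columns.head?

def find_pk_column_py (table_name : String) (columns : List String) : Option String :=
  let table_lower := PySem.Str.lower table_name
  let table_singular := pyRstripS table_lower
  let pk_patterns0 : List (Option String) :=
    [some (table_singular ++ "_id"), some (table_lower ++ "_id"), some "id",
     if PySem.Str.len table_singular > 4 then
       some (PySem.Str.slice table_singular none (some 4) ++ "_id") else none]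
  -- [p for p in pk_patterns if p]  (truthiness: drops None and "")
  let pk_patterns := pk_patterns0.filterMap (fun p? => p?.filter (fun p => decide (0 < PySem.Str.len p)))
  afterLoop columns (loopA pk_patterns columns)

-- ===== PORT B =====
def find_pk_column_py_alt (table_name : String) (columns : List String) : Option String :=
  let table_lower := PySem.Str.lower table_name
  let table_singular := pyRstripS table_lower
  let base := [table_singular ++ "_id", table_lower ++ "_id", "id"]
  let pk_patterns := if PySem.Str.len table_singular > 4 then
      base ++ [PySem.Str.slice table_singular none (some 4) ++ "_id"] else base
  let n := pk_patterns.length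
  let rank : String → Nat := fun col =>
    let low := PySem.Str.lower col
    match PySem.List.index? pk_patterns low with
    | some k => k
    | none => if PySem.Str.endswith low "_id" then n else n + 1
  if columns = [] then none else PySem.List.min? columns rank

-- ===== PRECONDITION & SPEC =====
def Spec_find_pk_column_py (table_name : String) (columns : List String) (out : Option String) : Prop := out = find_pk_column_py_alt table_name columns
instance (table_name : String) (columns : List String) (out : Option String) : Decidable (Spec_find_pk_column_py table_name columns out) := by unfold Spec_find_pk_column_py; infer_instance

-- ===== CLAIM (what is proved, stated in full; the proofs are below) =====
def Claim_equal_find_pk_column_py : Prop := ∀ (table_name : String) (columns : List String), Dom_find_pk_column_py table_name columns → Spec_find_pk_column_py table_name columns (find_pk_column_py table_name columns)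

-- ===== LEMMAS AND PROOFS =====

-- the two pattern-list constructions (A: option list + truthiness filter; B: conditional append) agree
theorem pats_eq (ts tl : String) :
    ([some (ts ++ "_id"), some (tl ++ "_id"), some "id",
      if PySem.Str.len ts > 4 then some (PySem.Str.slice ts none (some 4) ++ "_id") else none].filterMap
        (fun p? => p?.filter (fun p => decide (0 < PySem.Str.len p))))
    = (if PySem.Str.len ts > 4 then
        [ts ++ "_id", tl ++ "_id", "id"] ++ [PySem.Str.slice ts none (some 4) ++ "_id"]
       else [ts ++ "_id", tl ++ "_id", "id"]) := by
  have h1 : (0:Int) < (ts.length : Int) + 3 := by omega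
  have h2 : (0:Int) < (tl.length : Int) + 3 := by omega
  have h3 : (0:Int) < ((PySem.List.slice ts.toList none (some 4)).length : Int) + 3 := by omega
  split_ifs with h <;> simp [List.filterMap, Option.filter, h1, h2, h3]

theorem find?_congr' {α : Type} (p q : α → Bool) (l : List α)
    (h : ∀ a ∈ l, p a = q a) : l.find? p = l.find? q := by
  induction l with
  | nil => rfl
  | cons x xs ih =>
    have hx := h x (by simp)
    simp only [List.find?]
    rw [hx]
    cases q x
    · exact ih (fun a ha => h a (by simp [ha]))
    · rfl

-- the fold inside PySem.List.min?, as a named function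
def minStep (key : String → Nat) : Option String → String → Option String := fun acc x =>
  match acc with
  | none => some x
  | some m => if key x < key m then some x else some m

theorem min?_eq_foldl (key : String → Nat) (l : List String) :
    PySem.List.min? l key = l.foldl (minStep key) none := by
  unfold PySem.List.min? minStep
  congr 1
  funext acc x
  cases acc <;> rfl

-- once the accumulator holds a minimal element, the min?-fold keeps it
theorem fold_keep (key : String → Nat) (l : List String) (m : String)
    (h : ∀ x ∈ l, ¬ key x < key m) :
    l.foldl (minStep key) (some m) = some m := by
  induction l with
  | nil => rfl
  | cons x xs ih =>
    simp only [List.foldl, minStep]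
    rw [if_neg (h x (by simp))]
    exact ih (fun y hy => h y (by simp [hy]))

theorem fold_lt (key : String → Nat) (l : List String) (q : String) (r : Nat) :
    ∀ m : String, (∀ x ∈ l, r ≤ key x) → r < key m →
    l.find? (fun x => key x == r) = some q →
    l.foldl (minStep key) (some m) = some q := by
  induction l with
  | nil => intro m _ _ hf; simp at hf
  | cons x xs ih =>
    intro m hall hm hf
    by_cases hx : key x = r
    · rw [List.find?_cons_of_pos (by simp [hx])] at hf
      obtain rfl : x = q := by injection hf
      simp only [List.foldl, minStep]
      rw [if_pos (by omega)]
      exact fold_keep key xs x (fun y hy => by have := hall y (by simp [hy]); omega)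
    · rw [List.find?_cons_of_neg (by simp [hx])] at hf
      simp only [List.foldl, minStep]
      have hxr : r < key x := lt_of_le_of_ne (hall x (by simp)) (Ne.symm hx)
      split_ifs with hlt
      · exact ih x (fun y hy => hall y (by simp [hy])) hxr hf
      · exact ih m (fun y hy => hall y (by simp [hy])) hm hf

-- min? returns the FIRST element achieving the minimum rank r
theorem min_of (key : String → Nat) (l : List String) (r : Nat) (q : String)
    (hall : ∀ x ∈ l, r ≤ key x)
    (hf : l.find? (fun x => key x == r) = some q) :
    PySem.List.min? l key = some q := by
  cases l with
  | nil => simp at hf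
  | cons x xs =>
    rw [min?_eq_foldl]
    simp only [List.foldl, minStep]
    by_cases hx : key x = r
    · rw [List.find?_cons_of_pos (by simp [hx])] at hf
      obtain rfl : x = q := by injection hf
      exact fold_keep key xs x (fun y hy => by have := hall y (by simp [hy]); omega)
    · rw [List.find?_cons_of_neg (by simp [hx])] at hf
      have hxr : r < key x := lt_of_le_of_ne (hall x (by simp)) (Ne.symm hx)
      exact fold_lt key xs q r x (fun y hy => hall y (by simp [hy])) hxr hf

theorem index?_of_getElem (ps : List String) (v : String) :
    ∀ (k : Nat) (hk : k < ps.length), ps[k] = v →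
    (∀ j (hj : j < k), ps[j]'(hj.trans hk) ≠ v) →
    PySem.List.index? ps v = some k := by
  induction ps with
  | nil => intro k hk; simp at hk
  | cons p ps' ih =>
    intro k hk h hlt
    cases k with
    | zero =>
      have hp : p = v := by simpa using h
      rw [← hp]
      exact PySem.List.index?_cons_self p ps'
    | succ k' =>
      have hne : p ≠ v := by simpa using hlt 0 (Nat.succ_pos _)
      rw [PySem.List.index?_cons_of_ne ps' hne,
          ih k' (by simpa using hk) (by simpa using h)
            (fun j hj => by simpa using hlt (j+1) (by omega))]
      rfl

theorem loopA_none (ps cols : List String) (h : loopA ps cols = none) :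
    ∀ p ∈ ps, ∀ col ∈ cols, PySem.Str.lower col ≠ p := by
  induction ps with
  | nil => simp
  | cons p ps' ih =>
    simp only [loopA] at h
    cases hf : cols.find? (fun col => PySem.Str.lower col == p) with
    | some c => rw [hf] at h; simp at h
    | none =>
      rw [hf] at h
      intro p' hp' col hcol
      rcases List.mem_cons.mp hp' with rfl | hmem
      · have := List.find?_eq_none.mp hf col hcol
        simpa using this
      · exact ih h p' hmem col hcol

theorem loopA_some (ps cols : List String) (c : String) (h : loopA ps cols = some c) :
    ∃ k, ∃ hk : k < ps.length,
      cols.find? (fun col => PySem.Str.lower col == ps[k]) = some c ∧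
      ∀ j (hj : j < k), ∀ col ∈ cols, PySem.Str.lower col ≠ ps[j]'(hj.trans hk) := by
  induction ps with
  | nil => simp [loopA] at h
  | cons p ps' ih =>
    simp only [loopA] at h
    cases hf : cols.find? (fun col => PySem.Str.lower col == p) with
    | some c' =>
      rw [hf] at h
      obtain rfl : c' = c := by injection h
      exact ⟨0, Nat.succ_pos _, by simpa using hf, fun j hj => by omega⟩
    | none =>
      rw [hf] at h
      obtain ⟨k, hk, hfind, hearl⟩ := ih h
      refine ⟨k + 1, by simpa using Nat.succ_lt_succ hk, by simpa using hfind, ?_⟩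
      intro j hj col hcol
      cases j with
      | zero =>
        have := List.find?_eq_none.mp hf col hcol
        simpa using this
      | succ j' =>
        have := hearl j' (by omega) col hcol
        simpa using this

-- the workhorse: A's staged search equals the single ranked min?-pass, for ANY pattern list
theorem main_equiv (ps cols : List String) :
    afterLoop cols (loopA ps cols)
    = (if cols = [] then none else
        PySem.List.min? cols (fun col =>
          match PySem.List.index? ps (PySem.Str.lower col) with
          | some k => k
          | none => if PySem.Str.endswith (PySem.Str.lower col) "_id" then ps.length
                    else ps.length + 1)) := by
  set key : String → Nat := fun col =>
    match PySem.List.index? ps (PySem.Str.lower col) with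
    | some k => k
    | none => if PySem.Str.endswith (PySem.Str.lower col) "_id" then ps.length
              else ps.length + 1 with hkey
  cases hA : loopA ps cols with
  | some c =>
    obtain ⟨k, hk, hfind, hearl⟩ := loopA_some ps cols c hA
    have hcne : cols ≠ [] := by
      intro hnil; rw [hnil] at hfind; simp at hfind
    simp only [afterLoop]
    rw [if_neg hcne]
    -- every column ranks at least k
    have hall : ∀ col ∈ cols, k ≤ key col := by
      intro col hcol
      simp only [hkey]
      cases hix : PySem.List.index? ps (PySem.Str.lower col) with
      | some j =>
        simp only [hix]
        by_contra hlt
        obtain ⟨hj, hpj, _⟩ := PySem.List.getElem_of_index?_eq_some hix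
        exact hearl j (by omega) col hcol hpj.symm
      | none => simp only [hix]; split <;> omega
    -- (key col = k) coincides with (lower col = ps[k]) on cols
    have hagree : ∀ col ∈ cols, (key col == k) = (PySem.Str.lower col == ps[k]) := by
      intro col hcol
      by_cases hc : PySem.Str.lower col = ps[k]
      · have hix : PySem.List.index? ps (PySem.Str.lower col) = some k := by
          apply index?_of_getElem ps _ k hk hc.symm
          intro j hj hpj
          exact hearl j hj col hcol hpj.symm
        have hkcol : key col = k := by
          simp only [hkey]
          rw [hix]
        simp [hkcol, hc]
      · have hkc : key col ≠ k := by
          simp only [hkey]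
          cases hix : PySem.List.index? ps (PySem.Str.lower col) with
          | some j =>
            simp only [hix]
            intro hkk
            subst hkk
            obtain ⟨hj, hpj, _⟩ := PySem.List.getElem_of_index?_eq_some hix
            exact hc hpj.symm
          | none =>
            simp only [hix]
            split <;> omega
        simp [hkc, hc]
    rw [min_of key cols k c hall
        (by rw [find?_congr' _ _ cols hagree]; exact hfind)]
  | none =>
    simp only [afterLoop]
    have hnp := loopA_none ps cols hA
    have hix : ∀ col ∈ cols, PySem.List.index? ps (PySem.Str.lower col) = none := by
      intro col hcol
      rw [PySem.List.index?_eq_none_iff]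
      intro hmem
      exact hnp _ hmem col hcol rfl
    cases hE : cols.find? (fun col => PySem.Str.endswith (PySem.Str.lower col) "_id") with
    | some c =>
      have hcne : cols ≠ [] := by
        intro hnil; rw [hnil] at hE; simp at hE
      rw [if_neg hcne]
      have hall : ∀ col ∈ cols, ps.length ≤ key col := by
        intro col hcol
        simp only [hkey, hix col hcol]
        split <;> omega
      have hagree : ∀ col ∈ cols,
          (key col == ps.length) = PySem.Str.endswith (PySem.Str.lower col) "_id" := by
        intro col hcol
        simp only [hkey, hix col hcol]
        cases hE2 : PySem.Str.endswith (PySem.Str.lower col) "_id" <;> simp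
      rw [min_of key cols ps.length c hall
          (by rw [find?_congr' _ _ cols hagree]; exact hE)]
    | none =>
      have hnoid := List.find?_eq_none.mp hE
      cases cols with
      | nil => simp
      | cons c rest =>
        rw [if_neg (by simp)]
        have hkeyall : ∀ col ∈ (c :: rest), key col = ps.length + 1 := by
          intro col hcol
          simp only [hkey, hix col hcol]
          rw [if_neg (by simpa using hnoid col hcol)]
        rw [min_of key (c :: rest) (ps.length + 1) c
            (fun col hcol => le_of_eq (hkeyall col hcol).symm)
            (List.find?_cons_of_pos (by simp [hkeyall c (by simp)]))]
        simp

-- ===== VERDICT (by name: the statement is the Claim_ definition above) =====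
set_option maxHeartbeats 1000000 in
theorem find_pk_column_py_spec : Claim_equal_find_pk_column_py := by
  intro table_name columns _
  unfold Spec_find_pk_column_py
  simp only [find_pk_column_py, find_pk_column_py_alt]
  rw [pats_eq]
  exact main_equiv _ columns
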